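-- pv_equiv track=rewrite | github.com/mentecatoDev/python | Cadenas/06c.py | revocaliza
-- ===== SOURCE A (Python) =====
-- def revocaliza(cad):
--     revoca = ""
--     voc = "aeiouaAEIOUA"
--     for car in cad:
--         if car in "aeiouAEIOU":
--             revoca += voc[voc.find(car)+1]
--         else:
--             revoca += car
--     return revoca
-- ===== SOURCE B (Python) =====
-- def revocaliza(cad):
--     # vowel-major: ten staged full passes, one per vowel, rebuilding the
--     # sequence functionally from the ORIGINAL string's characters
--     out = list(cad)
--     for old, new in zip("aeiouAEIOU", "eiouaEIOUA"):
--         out = [new if c == old else x for c, x in zip(cad, out)]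
--     return "".join(out)
-- ===== Notes on version B (the rewrite author's own statement) =====
-- stated objective: alternative
-- what changed: Replaces A's character-major single pass (membership test + find into a lookup string, string concatenation) by a vowel-major algorithm: ten staged whole-string passes, one per vowel, each rewriting the positions of that vowel in a functionally rebuilt list zipped against the original string.
import Mathlib
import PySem

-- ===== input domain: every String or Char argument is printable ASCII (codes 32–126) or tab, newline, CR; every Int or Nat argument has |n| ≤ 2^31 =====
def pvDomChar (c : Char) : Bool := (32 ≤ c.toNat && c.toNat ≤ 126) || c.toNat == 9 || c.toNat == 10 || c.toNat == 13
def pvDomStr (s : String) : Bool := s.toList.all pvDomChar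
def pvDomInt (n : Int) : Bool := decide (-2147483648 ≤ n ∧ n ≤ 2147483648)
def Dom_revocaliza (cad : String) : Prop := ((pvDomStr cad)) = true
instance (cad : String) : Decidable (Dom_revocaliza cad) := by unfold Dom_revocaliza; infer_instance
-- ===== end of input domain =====

-- B replaces A's character-major loop (membership test + find into a lookup string) by a
-- vowel-major algorithm: ten staged whole-string passes, one per vowel, each rewriting the
-- positions of that vowel in a list rebuilt against the original string; same result.

-- ===== PORT A =====
def revocaliza (cad : String) : String :=
  String.ofList <| cad.toList.foldl (fun revoca car =>
    if PySem.Str.isIn (String.singleton car) "aeiouAEIOU" then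
      -- voc[voc.find(car)+1]; the index is always in range here, so pyGet? is always some
      revoca ++ ((PySem.Str.pyGet? "aeiouaAEIOUA"
        (PySem.Str.find "aeiouaAEIOUA" (String.singleton car) + 1)).map ([·])).getD []
    else
      revoca ++ [car]) []

-- ===== PORT B =====
-- zip("aeiouAEIOU", "eiouaEIOUA")
def pvPairs : List (Char × Char) := List.zip "aeiouAEIOU".toList "eiouaEIOUA".toList

-- out = list(cad); for old,new in pairs: out = [new if c == old else x for c, x in zip(cad, out)]
def revocaliza_alt (cad : String) : String :=
  String.ofList <|
    pvPairs.foldl (fun out p =>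
      (List.zip cad.toList out).map (fun q => if q.1 == p.1 then p.2 else q.2))
      cad.toList

-- ===== PRECONDITION & SPEC =====
def Spec_revocaliza (cad : String) (out : String) : Prop := out = revocaliza_alt cad
instance (cad : String) (out : String) : Decidable (Spec_revocaliza cad out) := by unfold Spec_revocaliza; infer_instance

-- ===== CLAIM (what is proved, stated in full; the proofs are below) =====
def Claim_equal_revocaliza : Prop := ∀ (cad : String), Dom_revocaliza cad → Spec_revocaliza cad (revocaliza cad)

-- ===== LEMMAS AND PROOFS =====
-- one of B's passes, applied to a pointwise-mapped state, acts pointwise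
theorem pass_map (l : List Char) (g : Char → Char) (o n : Char) :
    (List.zip l (l.map g)).map (fun q => if q.1 == o then n else q.2)
      = l.map (fun c => if c == o then n else g c) := by
  induction l with
  | nil => rfl
  | cons a t ih => simp only [List.zip_cons_cons, List.map_cons, ih]

-- B's staged passes collapse to a single pointwise map of the chained per-char updates
theorem passes_map (l : List Char) (ps : List (Char × Char)) (g : Char → Char)
    (out : List Char) (hout : out = l.map g) :
    ps.foldl (fun out p => (List.zip l out).map (fun q => if q.1 == p.1 then p.2 else q.2)) out
      = l.map (fun c => ps.foldl (fun x p => if c == p.1 then p.2 else x) (g c)) := by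
  subst hout
  induction ps generalizing g with
  | nil => rfl
  | cons p t ih => simp only [List.foldl_cons, pass_map, ih]

-- per-character agreement of A's loop body with B's chained per-char update
theorem step_eq (c : Char) :
    (if PySem.Str.isIn (String.singleton c) "aeiouAEIOU" then
      ((PySem.Str.pyGet? "aeiouaAEIOUA"
        (PySem.Str.find "aeiouaAEIOUA" (String.singleton c) + 1)).map ([·])).getD []
    else [c])
    = [pvPairs.foldl (fun x p => if c == p.1 then p.2 else x) c] := by
  by_cases h : c ∈ ['a','e','i','o','u','A','E','I','O','U']
  · fin_cases h <;> decide
  · simp only [List.mem_cons, not_or] at h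
    obtain ⟨h1,h2,h3,h4,h5,h6,h7,h8,h9,h10,-⟩ := h
    have hin : PySem.Str.isIn (String.singleton c) "aeiouAEIOU" = false := by
      rw [Bool.eq_false_iff, Ne, PySem.Str.isIn_iff_infix]
      intro hi
      have : c ∈ ("aeiouAEIOU".toList) :=
        (List.singleton_infix_iff c _).mp (by simpa using hi)
      simp at this
      tauto
    rw [hin]
    have hp : pvPairs = [('a','e'),('e','i'),('i','o'),('o','u'),('u','a'),
        ('A','E'),('E','I'),('I','O'),('O','U'),('U','A')] := by decide
    simp [hp, h1, h2, h3, h4, h5, h6, h7, h8, h9, h10]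

theorem main_eq (cad : String) : revocaliza cad = revocaliza_alt cad := by
  unfold revocaliza revocaliza_alt
  have hb : pvPairs.foldl (fun out p =>
        (List.zip cad.toList out).map (fun q => if q.1 == p.1 then p.2 else q.2)) cad.toList
      = cad.toList.map (fun c => pvPairs.foldl (fun x p => if c == p.1 then p.2 else x) c) := by
    exact passes_map cad.toList pvPairs id cad.toList (List.map_id _).symm
  rw [hb]
  have hf : (fun (revoca : List Char) car =>
      if PySem.Str.isIn (String.singleton car) "aeiouAEIOU" then
        revoca ++ ((PySem.Str.pyGet? "aeiouaAEIOUA"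
          (PySem.Str.find "aeiouaAEIOUA" (String.singleton car) + 1)).map ([·])).getD []
      else revoca ++ [car])
      = (fun revoca car => revoca ++ [pvPairs.foldl (fun x p => if car == p.1 then p.2 else x) car]) := by
    funext a c
    rw [show (if PySem.Str.isIn (String.singleton c) "aeiouAEIOU" then
        a ++ ((PySem.Str.pyGet? "aeiouaAEIOUA"
          (PySem.Str.find "aeiouaAEIOUA" (String.singleton c) + 1)).map ([·])).getD []
      else a ++ [c]) = a ++ (if PySem.Str.isIn (String.singleton c) "aeiouAEIOU" then
        ((PySem.Str.pyGet? "aeiouaAEIOUA"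
          (PySem.Str.find "aeiouaAEIOUA" (String.singleton c) + 1)).map ([·])).getD []
      else [c]) from by split <;> rfl, step_eq]
  rw [hf, PySem.List.foldl_append_singleton_eq_map, List.nil_append]

-- ===== VERDICT (by name: the statement is the Claim_ definition above) =====
theorem revocaliza_spec : Claim_equal_revocaliza := by
  intro cad _
  unfold Spec_revocaliza
  exact main_eq cad
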